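-- pv_equiv track=rewrite | github.com/clockworksilas/deu | app.py | find_errors
-- ===== SOURCE A (Python) =====
-- def find_errors(original, user_input):
--     original_words = original.split()
--     user_words = user_input.split()
--     errors = []
--     for i, (orig_word, user_word) in enumerate(zip(original_words, user_words)):
--         if orig_word != user_word:
--             errors.append((i, orig_word, user_word))
--     if len(original_words) > len(user_words):
--         for i in range(len(user_words), len(original_words)):
--             errors.append((i, original_words[i], ""))
--     elif len(original_words) < len(user_words):
--         for i in range(len(original_words), len(user_words)):
--             errors.append((i, "", user_words[i]))
--     return errors
-- ===== SOURCE B (Python) =====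
-- def find_errors(original, user_input):
--     original_words = original.split()
--     user_words = user_input.split()
--     mismatched = set(enumerate(original_words)) ^ set(enumerate(user_words))
--     errors = []
--     for i in sorted({j for j, _ in mismatched}):
--         o = original_words[i] if i < len(original_words) else ""
--         u = user_words[i] if i < len(user_words) else ""
--         errors.append((i, o, u))
--     return errors
-- ===== Notes on version B (the rewrite author's own statement) =====
-- stated objective: alternative
-- what changed: B finds the mismatch positions by set algebra - the symmetric difference of the two sets of enumerated (index, word) pairs, then sorts the offending indices and looks each side up with '' padding - instead of A's sequential zip comparison loop plus two length-conditioned trailing loops.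
import Mathlib
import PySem

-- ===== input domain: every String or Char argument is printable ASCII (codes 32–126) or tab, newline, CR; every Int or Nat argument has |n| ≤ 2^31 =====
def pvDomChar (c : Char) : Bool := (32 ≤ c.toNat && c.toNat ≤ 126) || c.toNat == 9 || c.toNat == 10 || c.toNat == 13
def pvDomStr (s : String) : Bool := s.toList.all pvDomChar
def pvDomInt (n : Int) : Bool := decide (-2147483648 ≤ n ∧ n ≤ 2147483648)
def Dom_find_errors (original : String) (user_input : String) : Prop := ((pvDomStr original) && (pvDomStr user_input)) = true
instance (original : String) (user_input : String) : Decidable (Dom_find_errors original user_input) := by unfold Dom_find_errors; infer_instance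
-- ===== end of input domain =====

-- B computes the mismatch positions by set algebra — the symmetric difference of the two
-- sets of enumerated (index, word) pairs, sorted — instead of A's zip loop plus two
-- length-conditioned trailing loops (alternative algorithm, same result).

-- ===== PORT A =====
def find_errors_core (original_words : List String) (user_words : List String) :
    List (Int × String × String) :=
  let errors : List (Int × String × String) :=
    (PySem.List.enumerate (original_words.zip user_words)).foldl
      (fun errors p => if p.2.1 ≠ p.2.2 then errors ++ [(p.1, p.2.1, p.2.2)] else errors) []
  if (original_words.length : Int) > (user_words.length : Int) then
    (PySem.List.pyRange (user_words.length : Int) (original_words.length : Int)).foldl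
      (fun errors i => errors ++ [(i, PySem.List.pyGetD original_words i "", "")]) errors
  else if (original_words.length : Int) < (user_words.length : Int) then
    (PySem.List.pyRange (original_words.length : Int) (user_words.length : Int)).foldl
      (fun errors i => errors ++ [(i, "", PySem.List.pyGetD user_words i "")]) errors
  else errors

def find_errors (original : String) (user_input : String) : List (Int × String × String) :=
  find_errors_core (PySem.Str.split₀ original) (PySem.Str.split₀ user_input)

-- ===== PORT B =====
-- Python's `so ^ su` and the set comprehension iterate in hash order; both are consumed
-- only into another set that is then sorted without a key, so the result is order-independent
-- and the port may use PySem.Set's insertion order.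
def find_errors_alt_core (original_words : List String) (user_words : List String) :
    List (Int × String × String) :=
  let mismatched := PySem.Set.symmDiff
      (PySem.Set.ofList (PySem.List.enumerate original_words))
      (PySem.Set.ofList (PySem.List.enumerate user_words))
  let bad := PySem.List.sorted (PySem.Set.ofList (mismatched.map (fun p => p.1))) (fun i => i)
  bad.foldl (fun errors i =>
    let o := if i < (original_words.length : Int) then PySem.List.pyGetD original_words i "" else ""
    let u := if i < (user_words.length : Int) then PySem.List.pyGetD user_words i "" else ""
    errors ++ [(i, o, u)]) []

def find_errors_alt (original : String) (user_input : String) : List (Int × String × String) :=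
  find_errors_alt_core (PySem.Str.split₀ original) (PySem.Str.split₀ user_input)

-- ===== PRECONDITION & SPEC =====
def Spec_find_errors (original : String) (user_input : String) (out : List (Int × String × String)) : Prop := out = find_errors_alt original user_input
instance (original : String) (user_input : String) (out : List (Int × String × String)) : Decidable (Spec_find_errors original user_input out) := by unfold Spec_find_errors; infer_instance

-- ===== CLAIM (what is proved, stated in full; the proofs are below) =====
def Claim_equal_find_errors : Prop := ∀ (original : String) (user_input : String), Dom_find_errors original user_input → Spec_find_errors original user_input (find_errors original user_input)

-- ===== LEMMAS AND PROOFS =====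

-- padded word at position i ('' beyond the end), used only by the proofs
def pvPad (xs : List String) (i : Int) : String :=
  if i < (xs.length : Int) then PySem.List.pyGetD xs i "" else ""

-- the common normal form both cores are reduced to
def pvSpecList (ow uw : List String) : List (Int × String × String) :=
  ((PySem.List.pyRange 0 (max (ow.length : Int) (uw.length : Int))).filter
      (fun i => decide (pvPad ow i ≠ pvPad uw i))).map
    (fun i => (i, pvPad ow i, pvPad uw i))

-- every piece produced by split₀.go is a nonempty character list
theorem pv_go_ne_nil (s : List Char) : ∀ (cur : List Char) (acc : List (List Char)),
    (∀ w ∈ acc, w ≠ []) → ∀ w ∈ PySem.Chars.split₀.go s cur acc, w ≠ [] := by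
  induction s with
  | nil =>
      intro cur acc hacc w hw
      simp only [PySem.Chars.split₀.go] at hw
      split at hw
      · exact hacc w (List.mem_reverse.mp hw)
      · rename_i hne
        rcases List.mem_cons.mp (List.mem_reverse.mp hw) with rfl | h
        · simpa [List.isEmpty_iff] using hne
        · exact hacc w h
  | cons c rest ih =>
      intro cur acc hacc w hw
      simp only [PySem.Chars.split₀.go] at hw
      split at hw
      · split at hw
        · exact ih [] acc hacc w hw
        · rename_i hne
          refine ih [] _ ?_ w hw
          intro v hv
          rcases List.mem_cons.mp hv with rfl | hv
          · simpa [List.isEmpty_iff] using hne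
          · exact hacc v hv
      · exact ih (c :: cur) acc hacc w hw

-- split() never yields the empty string
theorem pv_split0_ne_empty (s : String) : ∀ w ∈ PySem.Str.split₀ s, w ≠ "" := by
  intro w hw
  simp only [PySem.Str.split₀, List.mem_map] at hw
  obtain ⟨l, hl, rfl⟩ := hw
  have hne : l ≠ [] := by
    refine pv_go_ne_nil s.toList [] [] (by simp) l ?_
    simpa [PySem.Chars.split₀] using hl
  intro h
  apply hne
  simpa using congrArg String.toList h

-- membership in enumerate, phrased through pyGetD
theorem pv_mem_enum (xs : List String) (i : Int) (w : String) :
    (i, w) ∈ PySem.List.enumerate xs ↔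
      0 ≤ i ∧ i < (xs.length : Int) ∧ w = PySem.List.pyGetD xs i "" := by
  rw [PySem.List.mem_enumerate_iff]
  constructor
  · rintro ⟨k, h, heq⟩
    simp only [Prod.mk.injEq, zero_add] at heq
    obtain ⟨rfl, rfl⟩ := heq
    refine ⟨by positivity, by exact_mod_cast h, ?_⟩
    rw [PySem.List.pyGetD_eq_getElem xs "" (by positivity) (by exact_mod_cast h)]
    simp
  · rintro ⟨h0, h1, hw⟩
    refine ⟨i.toNat, by omega, ?_⟩
    simp only [Prod.mk.injEq, zero_add]
    exact ⟨by omega, by rw [hw, PySem.List.pyGetD_eq_getElem xs "" h0 h1]⟩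

-- the zip part of A in the padded normal form
theorem pv_part1 (ow uw : List String) :
    List.map (fun q : Int × String × String => (q.1, q.2.1, q.2.2))
      (List.filter (fun q : Int × String × String => decide (q.2.1 ≠ q.2.2))
        (PySem.List.enumerate (ow.zip uw)))
    = List.map (fun i : Int => (i, pvPad ow i, pvPad uw i))
        (List.filter (fun i : Int => decide (pvPad ow i ≠ pvPad uw i))
          (PySem.List.pyRange 0 ((ow.zip uw).length : Int))) := by
  have key : ∀ i ∈ PySem.List.pyRange 0 ((ow.zip uw).length : Int),
      PySem.List.pyGetD (ow.zip uw) i ("", "") = (pvPad ow i, pvPad uw i) := by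
    intro i hi
    rcases PySem.List.mem_pyRange_one.mp hi with ⟨h0, h1⟩
    have hmin : (ow.zip uw).length = min ow.length uw.length := List.length_zip
    have hio : i < (ow.length : Int) := by rw [hmin] at h1; push_cast at h1; omega
    have hiu : i < (uw.length : Int) := by rw [hmin] at h1; push_cast at h1; omega
    simp only [pvPad]
    rw [PySem.List.pyGetD_eq_getElem _ _ h0 h1, if_pos hio, if_pos hiu,
        PySem.List.pyGetD_eq_getElem ow "" h0 hio, PySem.List.pyGetD_eq_getElem uw "" h0 hiu]
    simp [List.getElem_zip]
  rw [PySem.List.enumerate_eq_map_pyRange (ow.zip uw) ("", "")]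
  simp only [PySem.List.len_eq]
  rw [List.filter_map, List.map_map]
  have hfc : List.filter ((fun q : Int × String × String => decide (q.2.1 ≠ q.2.2)) ∘
        (fun j : Int => (j, PySem.List.pyGetD (ow.zip uw) j ("", ""))))
      (PySem.List.pyRange 0 ((ow.zip uw).length : Int))
      = List.filter (fun i : Int => decide (pvPad ow i ≠ pvPad uw i))
        (PySem.List.pyRange 0 ((ow.zip uw).length : Int)) :=
    List.filter_congr (fun i hi => by simp only [Function.comp_apply, key i hi])
  rw [hfc]
  refine List.map_congr_left (fun i hi => ?_)
  simp only [Function.comp_apply, key i (List.mem_of_mem_filter hi)]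

-- A's core in the padded normal form
theorem pv_A_eq (ow uw : List String)
    (how : ∀ w ∈ ow, w ≠ "") (huw : ∀ w ∈ uw, w ≠ "") :
    find_errors_core ow uw = pvSpecList ow uw := by
  have hminle : ((ow.zip uw).length : Int) ≤ max (ow.length : Int) (uw.length : Int) := by
    have h := List.length_zip (l₁ := ow) (l₂ := uw)
    rw [h]; push_cast; omega
  have hsplit : PySem.List.pyRange 0 (max (ow.length : Int) (uw.length : Int))
      = PySem.List.pyRange 0 ((ow.zip uw).length : Int)
        ++ PySem.List.pyRange ((ow.zip uw).length : Int) (max (ow.length : Int) (uw.length : Int)) :=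
    PySem.List.pyRange_one_append _ _ _ (by positivity) hminle
  simp only [find_errors_core, pvSpecList]
  rw [PySem.List.foldl_append_ite (fun q : Int × String × String => q.2.1 ≠ q.2.2)
        (fun q : Int × String × String => (q.1, q.2.1, q.2.2))]
  rw [hsplit, List.filter_append, List.map_append]
  simp only [List.nil_append]
  rcases lt_trichotomy ow.length uw.length with hlt | heq | hgt
  · -- |ow| < |uw| : A takes the elif branch
    have h1 : ¬ ((ow.length : Int) > (uw.length : Int)) := by omega
    have h2 : (ow.length : Int) < (uw.length : Int) := by omega
    rw [if_neg h1, if_pos h2,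
        PySem.List.foldl_append_singleton_eq_map
          (fun i : Int => (i, "", PySem.List.pyGetD uw i ""))]
    have hz : ((ow.zip uw).length : Int) = (ow.length : Int) := by
      rw [List.length_zip]; push_cast; omega
    have hm : max (ow.length : Int) (uw.length : Int) = (uw.length : Int) := by omega
    rw [pv_part1, hz, hm]
    congr 1
    have hall : List.filter (fun i : Int => decide (pvPad ow i ≠ pvPad uw i))
        (PySem.List.pyRange (ow.length : Int) (uw.length : Int))
        = PySem.List.pyRange (ow.length : Int) (uw.length : Int) := by
      refine List.filter_eq_self.mpr ?_
      intro i hi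
      rcases PySem.List.mem_pyRange_one.mp hi with ⟨ha, hb⟩
      simp only [pvPad, decide_eq_true_eq]
      rw [if_neg (by omega), if_pos hb, PySem.List.pyGetD_eq_getElem uw "" (by omega) hb]
      exact Ne.symm (huw _ (List.getElem_mem _))
    rw [hall]
    refine (List.map_congr_left ?_).symm
    intro i hi
    rcases PySem.List.mem_pyRange_one.mp hi with ⟨ha, hb⟩
    simp only [pvPad]
    rw [if_neg (by omega), if_pos hb]
  · -- equal lengths : A keeps just the zip part
    have h1 : ¬ ((ow.length : Int) > (uw.length : Int)) := by omega
    have h2 : ¬ ((ow.length : Int) < (uw.length : Int)) := by omega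
    rw [if_neg h1, if_neg h2]
    have hz : ((ow.zip uw).length : Int) = max (ow.length : Int) (uw.length : Int) := by
      rw [List.length_zip]; push_cast; omega
    rw [pv_part1, hz]
    simp [PySem.List.pyRange_one_eq_nil (le_refl _)]
  · -- |ow| > |uw| : A takes the first trailing branch
    have h1 : (ow.length : Int) > (uw.length : Int) := by omega
    rw [if_pos h1,
        PySem.List.foldl_append_singleton_eq_map
          (fun i : Int => (i, PySem.List.pyGetD ow i "", ""))]
    have hz : ((ow.zip uw).length : Int) = (uw.length : Int) := by
      rw [List.length_zip]; push_cast; omega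
    have hm : max (ow.length : Int) (uw.length : Int) = (ow.length : Int) := by omega
    rw [pv_part1, hz, hm]
    congr 1
    have hall : List.filter (fun i : Int => decide (pvPad ow i ≠ pvPad uw i))
        (PySem.List.pyRange (uw.length : Int) (ow.length : Int))
        = PySem.List.pyRange (uw.length : Int) (ow.length : Int) := by
      refine List.filter_eq_self.mpr ?_
      intro i hi
      rcases PySem.List.mem_pyRange_one.mp hi with ⟨ha, hb⟩
      simp only [pvPad, decide_eq_true_eq]
      rw [if_pos hb, if_neg (by omega), PySem.List.pyGetD_eq_getElem ow "" (by omega) hb]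
      exact how _ (List.getElem_mem _)
    rw [hall]
    refine (List.map_congr_left ?_).symm
    intro i hi
    rcases PySem.List.mem_pyRange_one.mp hi with ⟨ha, hb⟩
    simp only [pvPad]
    rw [if_pos hb, if_neg (by omega)]

-- an index is in B's symmetric difference iff it is in range and the padded words differ
theorem pv_bad_iff (ow uw : List String)
    (how : ∀ w ∈ ow, w ≠ "") (huw : ∀ w ∈ uw, w ≠ "") (i : Int) :
    (∃ p : Int × String,
        p ∈ PySem.Set.symmDiff (PySem.Set.ofList (PySem.List.enumerate ow))
              (PySem.Set.ofList (PySem.List.enumerate uw)) ∧ p.1 = i)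
    ↔ (0 ≤ i ∧ i < max (ow.length : Int) (uw.length : Int)) ∧ pvPad ow i ≠ pvPad uw i := by
  constructor
  · rintro ⟨⟨j, w⟩, hp, rfl⟩
    rw [PySem.Set.mem_symmDiff] at hp
    simp only [PySem.Set.mem_ofList] at hp
    rcases hp with ⟨hin, hout⟩ | ⟨hin, hout⟩
    · obtain ⟨h0, h1, hw⟩ := (pv_mem_enum ow j w).mp hin
      refine ⟨⟨h0, by omega⟩, ?_⟩
      simp only [pvPad]
      rw [if_pos h1, ← hw]
      by_cases h2 : j < (uw.length : Int)
      · rw [if_pos h2]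
        intro hcon
        exact hout ((pv_mem_enum uw j w).mpr ⟨h0, h2, hcon⟩)
      · rw [if_neg h2, hw, PySem.List.pyGetD_eq_getElem ow "" h0 h1]
        exact how _ (List.getElem_mem _)
    · obtain ⟨h0, h1, hw⟩ := (pv_mem_enum uw j w).mp hin
      refine ⟨⟨h0, by omega⟩, ?_⟩
      simp only [pvPad]
      rw [if_pos h1, ← hw]
      by_cases h2 : j < (ow.length : Int)
      · rw [if_pos h2]
        intro hcon
        exact hout ((pv_mem_enum ow j w).mpr ⟨h0, h2, hcon.symm⟩)
      · rw [if_neg h2, hw]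
        intro hcon
        refine huw _ (?_ : uw[j.toNat] ∈ uw) ?_
        · exact List.getElem_mem _
        · rw [← PySem.List.pyGetD_eq_getElem uw "" h0 h1, ← hcon]
  · rintro ⟨⟨h0, hmax⟩, hne⟩
    by_cases h1 : i < (ow.length : Int)
    · refine ⟨(i, PySem.List.pyGetD ow i ""), ?_, rfl⟩
      rw [PySem.Set.mem_symmDiff]
      simp only [PySem.Set.mem_ofList]
      left
      refine ⟨(pv_mem_enum ow i _).mpr ⟨h0, h1, rfl⟩, ?_⟩
      intro hcon
      obtain ⟨_, h2, hw⟩ := (pv_mem_enum uw i _).mp hcon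
      apply hne
      simp only [pvPad]
      rw [if_pos h1, if_pos h2, ← hw]
    · have h2 : i < (uw.length : Int) := by omega
      refine ⟨(i, PySem.List.pyGetD uw i ""), ?_, rfl⟩
      rw [PySem.Set.mem_symmDiff]
      simp only [PySem.Set.mem_ofList]
      right
      refine ⟨(pv_mem_enum uw i _).mpr ⟨h0, h2, rfl⟩, ?_⟩
      intro hcon
      obtain ⟨_, h1', _⟩ := (pv_mem_enum ow i _).mp hcon
      exact h1 h1'

-- B's core in the padded normal form
theorem pv_B_eq (ow uw : List String)
    (how : ∀ w ∈ ow, w ≠ "") (huw : ∀ w ∈ uw, w ≠ "") :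
    find_errors_alt_core ow uw = pvSpecList ow uw := by
  have hstep : find_errors_alt_core ow uw =
      (PySem.List.sorted
        (PySem.Set.ofList
          ((PySem.Set.symmDiff (PySem.Set.ofList (PySem.List.enumerate ow))
              (PySem.Set.ofList (PySem.List.enumerate uw))).map (fun p => p.1)))
        (fun i => i)).foldl
        (fun errors i => errors ++ [(i, pvPad ow i, pvPad uw i)]) [] := rfl
  rw [hstep, PySem.List.foldl_append_singleton_eq_map (fun i : Int => (i, pvPad ow i, pvPad uw i))]
  have hperm : (List.filter (fun i : Int => decide (pvPad ow i ≠ pvPad uw i))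
        (PySem.List.pyRange 0 (max (ow.length : Int) (uw.length : Int)))).Perm
      (PySem.Set.ofList
        ((PySem.Set.symmDiff (PySem.Set.ofList (PySem.List.enumerate ow))
            (PySem.Set.ofList (PySem.List.enumerate uw))).map (fun p => p.1))) := by
    rw [List.perm_ext_iff_of_nodup
          ((PySem.List.nodup_pyRange_one _ _).filter _) (PySem.Set.nodup_ofList _)]
    intro i
    rw [List.mem_filter, PySem.Set.mem_ofList, List.mem_map]
    rw [pv_bad_iff ow uw how huw i]
    rw [PySem.List.mem_pyRange_one]
    simp
  have hsorted : PySem.List.sorted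
      (PySem.Set.ofList
        ((PySem.Set.symmDiff (PySem.Set.ofList (PySem.List.enumerate ow))
            (PySem.Set.ofList (PySem.List.enumerate uw))).map (fun p => p.1)))
      (fun i => i)
      = List.filter (fun i : Int => decide (pvPad ow i ≠ pvPad uw i))
          (PySem.List.pyRange 0 (max (ow.length : Int) (uw.length : Int))) :=
    PySem.List.sorted_eq_of_perm_of_pairwise_lt _ _ _ hperm
      ((PySem.List.pairwise_lt_pyRange_one _ _).filter _)
  rw [hsorted]
  simp [pvSpecList]

-- ===== VERDICT (by name: the statement is the Claim_ definition above) =====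
theorem find_errors_spec : Claim_equal_find_errors := by
  intro original user_input _
  unfold Spec_find_errors find_errors find_errors_alt
  rw [pv_A_eq _ _ (pv_split0_ne_empty original) (pv_split0_ne_empty user_input),
      pv_B_eq _ _ (pv_split0_ne_empty original) (pv_split0_ne_empty user_input)]
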